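-- pv_equiv track=rewrite | github.com/SergioTA01229274/Python-Code | Finalpartial/Repaso.py | ordena_ABC
-- ===== SOURCE A (Python) =====
-- def ordena_ABC(matrix):
--     newMatrix = [[], [], [], []]
--     for List in matrix:
--         for i in List:
--             if i[0] == "a":
--                 newMatrix[0].append(i)
--             elif i[0] == "b":
--                 newMatrix[1].append(i)
--             elif i[0] == "c":
--                 newMatrix[2].append(i)
--             else:
--                 newMatrix[3].append(i)
--     return newMatrix
-- ===== SOURCE B (Python) =====
-- def ordena_ABC(matrix):
--     flat = [i for row in matrix for i in row]
--     return [[i for i in flat if i[0] == "a"],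
--             [i for i in flat if i[0] == "b"],
--             [i for i in flat if i[0] == "c"],
--             [i for i in flat if i[0] not in ("a", "b", "c")]]
-- ===== Notes on version B (the rewrite author's own statement) =====
-- stated objective: simpler
-- what changed: Replaces the single accumulation pass maintaining four buckets at once with a flatten followed by four independent filter passes, one per bucket.
import Mathlib
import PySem

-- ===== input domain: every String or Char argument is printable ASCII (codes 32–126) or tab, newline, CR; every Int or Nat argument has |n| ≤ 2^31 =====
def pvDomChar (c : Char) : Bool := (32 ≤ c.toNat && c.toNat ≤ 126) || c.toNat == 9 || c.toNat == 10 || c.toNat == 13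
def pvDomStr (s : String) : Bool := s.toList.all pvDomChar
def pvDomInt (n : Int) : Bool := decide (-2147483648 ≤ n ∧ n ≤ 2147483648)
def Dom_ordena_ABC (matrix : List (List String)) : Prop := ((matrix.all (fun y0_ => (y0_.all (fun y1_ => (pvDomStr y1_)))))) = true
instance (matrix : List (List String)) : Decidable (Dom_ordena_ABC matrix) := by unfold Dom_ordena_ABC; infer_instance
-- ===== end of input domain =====

-- B builds the four buckets by flattening the matrix and filtering it four times (one pass per bucket), instead of A's single pass maintaining all four accumulators; same cost, simpler decomposition.


-- ===== PORT A =====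
-- one step of A's loop body: classify i by its first character and append to the right bucket;
-- on an empty string Python raises IndexError (i[0]) — those inputs are outside Pre_ (the [] branch is unreached there)
def ordenaStep (st : List String × List String × List String × List String) (i : String) :
    List String × List String × List String × List String :=
  match i.toList with
  | [] => st
  | c :: _ =>
    if c = 'a' then (st.1 ++ [i], st.2.1, st.2.2.1, st.2.2.2)
    else if c = 'b' then (st.1, st.2.1 ++ [i], st.2.2.1, st.2.2.2)
    else if c = 'c' then (st.1, st.2.1, st.2.2.1 ++ [i], st.2.2.2)
    else (st.1, st.2.1, st.2.2.1, st.2.2.2 ++ [i])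

def ordena_ABC (matrix : List (List String)) : List (List String) :=
  let st := matrix.foldl (fun st row => row.foldl ordenaStep st) (([] : List String), [], [], [])
  [st.1, st.2.1, st.2.2.1, st.2.2.2]

-- ===== PORT B =====
-- i[0] of B's comprehensions; the '?' default is never read under Pre_ (Python raises IndexError there)
def pvFirst (i : String) : Char := i.toList.headD '?'

def ordena_ABC_alt (matrix : List (List String)) : List (List String) :=
  let flat := matrix.flatten
  [flat.filter (fun i => pvFirst i == 'a'),
   flat.filter (fun i => pvFirst i == 'b'),
   flat.filter (fun i => pvFirst i == 'c'),
   flat.filter (fun i => !(pvFirst i == 'a' || pvFirst i == 'b' || pvFirst i == 'c'))]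

-- ===== PRECONDITION & SPEC =====
-- Pre_ excludes matrices containing an empty string: both A and B raise IndexError there (i[0]).
def Pre_ordena_ABC (matrix : List (List String)) : Prop :=
  (matrix.all (fun row => row.all (fun s => !s.toList.isEmpty))) = true
instance (matrix : List (List String)) : Decidable (Pre_ordena_ABC matrix) := by unfold Pre_ordena_ABC; infer_instance
def pvWitness_ordena_ABC : List (List String) := [["abc", "beta"], ["cat", "dog"]]

def Spec_ordena_ABC (matrix : List (List String)) (out : List (List String)) : Prop := out = ordena_ABC_alt matrix
instance (matrix : List (List String)) (out : List (List String)) : Decidable (Spec_ordena_ABC matrix out) := by unfold Spec_ordena_ABC; infer_instance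

-- ===== CLAIM (what is proved, stated in full; the proofs are below) =====
def Claim_equal_ordena_ABC : Prop := ∀ (matrix : List (List String)), Dom_ordena_ABC matrix → Pre_ordena_ABC matrix → Spec_ordena_ABC matrix (ordena_ABC matrix)

-- ===== LEMMAS AND PROOFS =====

-- the fold over a flat list of nonempty strings extends each accumulator by the corresponding filter
theorem ordenaStep_foldl (l : List String) (h : ∀ s ∈ l, s.toList ≠ [])
    (a b c d : List String) :
    l.foldl ordenaStep (a, b, c, d) =
      (a ++ l.filter (fun i => pvFirst i == 'a'),
       b ++ l.filter (fun i => pvFirst i == 'b'),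
       c ++ l.filter (fun i => pvFirst i == 'c'),
       d ++ l.filter (fun i => !(pvFirst i == 'a' || pvFirst i == 'b' || pvFirst i == 'c'))) := by
  induction l generalizing a b c d with
  | nil => simp
  | cons x xs ih =>
    have hx : x.toList ≠ [] := h x (List.mem_cons_self)
    have hxs : ∀ s ∈ xs, s.toList ≠ [] := fun s hs => h s (List.mem_cons_of_mem _ hs)
    obtain ⟨ch, rest, hcr⟩ := List.exists_cons_of_ne_nil hx
    simp only [List.foldl_cons, ordenaStep, hcr, List.filter_cons]
    by_cases ha : ch = 'a'
    · simp [pvFirst, hcr, ha, ih hxs]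
    · by_cases hb : ch = 'b'
      · simp [pvFirst, hcr, hb, ih hxs]
      · by_cases hc : ch = 'c'
        · simp [pvFirst, hcr, hc, ih hxs]
        · simp [pvFirst, hcr, ha, hb, hc, ih hxs]

-- ===== VERDICT (by name: the statement is the Claim_ definition above) =====
theorem ordena_ABC_spec : Claim_equal_ordena_ABC := by
  intro matrix _ hpre
  unfold Spec_ordena_ABC ordena_ABC ordena_ABC_alt
  rw [← List.foldl_flatten]
  have h : ∀ s ∈ matrix.flatten, s.toList ≠ [] := by
    intro s hs
    obtain ⟨row, hrow, hsrow⟩ := List.mem_flatten.mp hs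
    have := List.all_eq_true.mp (List.all_eq_true.mp hpre row hrow) s hsrow
    simpa using this
  rw [ordenaStep_foldl matrix.flatten h]
  simp
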